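-- pv_equiv track=rewrite | github.com/Dicky59/ai-coding-agent | mcp-server/server_java.py | is_in_multiline_comment
-- ===== SOURCE A (Python) =====
-- def is_in_multiline_comment(lines: list[str], index: int) -> bool:
--     """Check if a line is inside a /* ... */ block comment."""
--     in_comment = False
--     for i, line in enumerate(lines):
--         stripped = line.strip()
--         if "/*" in stripped:
--             in_comment = True
--         if "*/" in stripped:
--             in_comment = False
--             continue
--         if i == index:
--             return in_comment
--     return False
-- ===== SOURCE B (Python) =====
-- def is_in_multiline_comment(lines: list[str], index: int) -> bool:
--     """Check if a line is inside a /* ... */ block comment."""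
--     if index < 0 or index >= len(lines):
--         return False
--     for i in range(index, -1, -1):
--         stripped = lines[i].strip()
--         if "*/" in stripped:
--             return False
--         if "/*" in stripped:
--             return True
--     return False
-- ===== Notes on version B (the rewrite author's own statement) =====
-- stated objective: alternative
-- what changed: Replaces A's forward whole-list scan carrying an in_comment flag with a range guard plus a backward scan from the queried line that returns at the nearest '*/' (False) or '/*' (True) above it.
import Mathlib
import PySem

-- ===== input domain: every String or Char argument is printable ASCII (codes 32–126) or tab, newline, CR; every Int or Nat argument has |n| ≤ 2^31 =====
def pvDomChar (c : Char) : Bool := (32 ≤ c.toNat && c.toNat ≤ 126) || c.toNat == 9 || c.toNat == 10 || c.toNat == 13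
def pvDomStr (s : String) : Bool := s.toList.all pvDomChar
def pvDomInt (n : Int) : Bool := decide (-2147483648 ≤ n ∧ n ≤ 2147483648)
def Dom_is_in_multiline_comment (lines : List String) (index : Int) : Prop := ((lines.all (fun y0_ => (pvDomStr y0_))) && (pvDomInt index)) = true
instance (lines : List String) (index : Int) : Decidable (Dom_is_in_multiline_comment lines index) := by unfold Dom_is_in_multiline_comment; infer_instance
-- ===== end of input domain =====

-- B replaces A's forward flag-carrying scan over the whole list with a backward nearest-delimiter
-- search from the queried line that stops at the first '*/' or '/*' (objective: alternative / early exit).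

-- ===== PORT A =====
-- the enumerated for-loop of A: i is the running enumerate counter, inComment the carried flag
def aGo (index : Int) : List String → Nat → Bool → Bool
  | [], _, _ => false
  | line :: rest, i, inComment =>
    let stripped := PySem.Str.strip line
    let inComment' := if PySem.Str.isIn "/*" stripped then true else inComment
    if PySem.Str.isIn "*/" stripped then aGo index rest (i + 1) false   -- in_comment = False; continue
    else if (i : Int) = index then inComment'                           -- return in_comment
    else aGo index rest (i + 1) inComment'

def is_in_multiline_comment (lines : List String) (index : Int) : Bool :=
  aGo index lines 0 false

-- ===== PORT B =====
-- one iteration of B's backward loop body: '*/' closes (False), '/*' opens (True), else keep looking below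
def bStep (line : String) (prev : Bool) : Bool :=
  if PySem.Str.isIn "*/" (PySem.Str.strip line) then false
  else if PySem.Str.isIn "/*" (PySem.Str.strip line) then true
  else prev

-- B's loop 'for i in range(index, -1, -1)': examine line i, recurse to i-1 only when no delimiter found
def bGo (lines : List String) : Nat → Bool
  | 0 => bStep (lines.getD 0 "") false
  | i + 1 => bStep (lines.getD (i + 1) "") (bGo lines i)

def is_in_multiline_comment_alt (lines : List String) (index : Int) : Bool :=
  if index < 0 ∨ (lines.length : Int) ≤ index then false
  else bGo lines index.toNat

-- ===== PRECONDITION & SPEC =====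
def Spec_is_in_multiline_comment (lines : List String) (index : Int) (out : Bool) : Prop := out = is_in_multiline_comment_alt lines index
instance (lines : List String) (index : Int) (out : Bool) : Decidable (Spec_is_in_multiline_comment lines index out) := by unfold Spec_is_in_multiline_comment; infer_instance

-- ===== CLAIM (what is proved, stated in full; the proofs are below) =====
def Claim_equal_is_in_multiline_comment : Prop := ∀ (lines : List String) (index : Int), Dom_is_in_multiline_comment lines index → Spec_is_in_multiline_comment lines index (is_in_multiline_comment lines index)

-- ===== LEMMAS AND PROOFS =====

-- value A's loop returns when the return point is the n-th remaining line
def chain : List String → Nat → Bool → Bool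
  | [], _, _ => false
  | l :: _, 0, acc => bStep l acc
  | l :: ls, n + 1, acc => chain ls n (bStep l acc)

lemma bStep_close {l : String} (h : PySem.Str.isIn "*/" (PySem.Str.strip l) = true)
    (acc : Bool) : bStep l acc = false := by
  simp only [bStep]; rw [if_pos h]

lemma bStep_open {l : String} (h : ¬ PySem.Str.isIn "*/" (PySem.Str.strip l) = true)
    (acc : Bool) :
    bStep l acc = if PySem.Str.isIn "/*" (PySem.Str.strip l) then true else acc := by
  simp only [bStep]; rw [if_neg h]

lemma aGo_eq (ls : List String) : ∀ (i : Nat) (acc : Bool) (index : Int),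
    aGo index ls i acc =
      if (i : Int) ≤ index ∧ index < (i : Int) + ls.length
      then chain ls (index - i).toNat acc else false := by
  induction ls with
  | nil => intro i acc index; simp [aGo, chain]
  | cons l ls ih =>
    intro i acc index
    simp only [aGo, ih, List.length_cons, Nat.cast_add, Nat.cast_one]
    by_cases heq : (i : Int) = index
    · have hD0 : (i : Int) ≤ index ∧ index < (i : Int) + ((ls.length : Int) + 1) :=
        ⟨by omega, by omega⟩
      have hD1 : ¬ ((i : Int) + 1 ≤ index ∧ index < (i : Int) + 1 + (ls.length : Int)) := by omega
      have h0 : (index - (i : Int)).toNat = 0 := by omega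
      by_cases hclose : PySem.Str.isIn "*/" (PySem.Str.strip l) = true
      · rw [if_pos hclose, if_neg hD1, if_pos hD0, h0]
        simp only [chain]
        rw [bStep_close hclose]
      · rw [if_neg hclose, if_pos heq, if_pos hD0, h0]
        simp only [chain]
        rw [bStep_open hclose]
    · by_cases hmid : (i : Int) < index ∧ index < (i : Int) + 1 + (ls.length : Int)
      · have hD0 : (i : Int) ≤ index ∧ index < (i : Int) + ((ls.length : Int) + 1) :=
          ⟨by omega, by omega⟩
        have hD1 : (i : Int) + 1 ≤ index ∧ index < (i : Int) + 1 + (ls.length : Int) :=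
          ⟨by omega, by omega⟩
        have hn : (index - (i : Int)).toNat = (index - ((i : Int) + 1)).toNat + 1 := by omega
        by_cases hclose : PySem.Str.isIn "*/" (PySem.Str.strip l) = true
        · rw [if_pos hclose, if_pos hD1, if_pos hD0, hn]
          simp only [chain]
          rw [bStep_close hclose]
        · rw [if_neg hclose, if_neg heq, if_pos hD1, if_pos hD0, hn]
          simp only [chain]
          rw [bStep_open hclose]
      · have hD0 : ¬ ((i : Int) ≤ index ∧ index < (i : Int) + ((ls.length : Int) + 1)) := by omega
        have hD1 : ¬ ((i : Int) + 1 ≤ index ∧ index < (i : Int) + 1 + (ls.length : Int)) := by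
          omega
        by_cases hclose : PySem.Str.isIn "*/" (PySem.Str.strip l) = true
        · rw [if_pos hclose, if_neg hD1, if_neg hD0]
        · rw [if_neg hclose, if_neg heq, if_neg hD1, if_neg hD0]

lemma chain_zero (ls : List String) (acc : Bool) (h : 0 < ls.length) :
    chain ls 0 acc = bStep (ls.getD 0 "") acc := by
  cases ls with
  | nil => simp at h
  | cons l ls => simp [chain]

lemma chain_succ (ls : List String) : ∀ (n : Nat) (acc : Bool), n + 1 < ls.length →
    chain ls (n + 1) acc = bStep (ls.getD (n + 1) "") (chain ls n acc) := by
  induction ls with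
  | nil => intro n acc h; simp at h
  | cons l ls ih =>
    intro n acc h
    cases n with
    | zero =>
      simp only [chain]
      rw [chain_zero ls (bStep l acc) (by simp at h; omega)]
      simp
    | succ m =>
      simp only [chain]
      rw [ih m (bStep l acc) (by simp at h; omega)]
      simp

lemma bGo_eq (lines : List String) : ∀ (n : Nat), n < lines.length →
    bGo lines n = chain lines n false := by
  intro n
  induction n with
  | zero => intro h; simp [bGo, chain_zero lines false h]
  | succ m ih =>
    intro h
    rw [bGo, chain_succ lines m false h, ih (by omega)]

-- ===== VERDICT (by name: the statement is the Claim_ definition above) =====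
theorem is_in_multiline_comment_spec : Claim_equal_is_in_multiline_comment := by
  intro lines index _
  unfold Spec_is_in_multiline_comment is_in_multiline_comment is_in_multiline_comment_alt
  rw [aGo_eq]
  by_cases h : index < 0 ∨ (lines.length : Int) ≤ index
  · rw [if_pos h, if_neg (by push_cast; omega)]
  · rw [if_neg h, if_pos (by push_cast; omega)]
    rw [bGo_eq lines index.toNat (by omega)]
    congr 1
    omega
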